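-- pv_equiv track=rewrite | github.com/caum-systems/parameter-golf-caum | optimizations_patch.py | get_palindromic_bank_indices
-- ===== SOURCE A (Python) =====
-- def get_palindromic_bank_indices(num_unique_blocks, recurrence_factor):
--     """
--     Generate palindromic bank index sequence for U-Net-style routing.
--
--     Example: K=6, R=2 → [0,1,2,3,4,5, 5,4,3,2,1,0]
--     Example: K=4, R=3 → [0,1,2,3, 3,2,1,0, 0,1,2,3]
--     """
--     forward = list(range(num_unique_blocks))
--     backward = list(reversed(range(num_unique_blocks)))
--
--     indices = []
--     for rep in range(recurrence_factor):
--         if rep % 2 == 0: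
--             indices.extend(forward)
--         else:
--             indices.extend(backward)
--
--     return indices
-- ===== SOURCE B (Python) =====
-- def get_palindromic_bank_indices(num_unique_blocks, recurrence_factor):
--     total = max(num_unique_blocks, 0) * max(recurrence_factor, 0)
--
--     def elem(p):
--         rep, off = divmod(p, num_unique_blocks)
--         return off if rep % 2 == 0 else num_unique_blocks - 1 - off
--
--     return [elem(p) for p in range(total)]
-- ===== Notes on version B (the rewrite author's own statement) =====
-- stated objective: alternative
-- what changed: B drops A's forward/backward lists and rep loop, computing each element directly by position in one flat pass via divmod over range(max(K,0)*max(R,0)).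
import Mathlib
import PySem

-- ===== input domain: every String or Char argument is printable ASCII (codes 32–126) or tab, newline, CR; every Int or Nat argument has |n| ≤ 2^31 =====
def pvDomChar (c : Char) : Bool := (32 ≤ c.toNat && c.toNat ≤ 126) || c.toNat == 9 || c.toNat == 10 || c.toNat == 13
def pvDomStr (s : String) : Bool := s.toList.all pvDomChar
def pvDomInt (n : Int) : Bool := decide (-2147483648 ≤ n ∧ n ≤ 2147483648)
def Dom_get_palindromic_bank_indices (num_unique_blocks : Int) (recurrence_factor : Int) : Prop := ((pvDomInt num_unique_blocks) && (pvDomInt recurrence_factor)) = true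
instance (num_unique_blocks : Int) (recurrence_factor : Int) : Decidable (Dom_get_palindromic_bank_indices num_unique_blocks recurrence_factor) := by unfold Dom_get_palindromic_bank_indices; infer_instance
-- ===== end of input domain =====

-- B replaces A's forward/backward lists and rep loop by one flat pass computing each
-- element from its position with divmod (objective: alternative decomposition, same cost).

-- ===== PORT A =====
def get_palindromic_bank_indices (num_unique_blocks : Int) (recurrence_factor : Int) : List Int :=
  let forward := PySem.List.pyRange 0 num_unique_blocks 1
  let backward := (PySem.List.pyRange 0 num_unique_blocks 1).reverse
  (PySem.List.pyRange 0 recurrence_factor 1).foldl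
    (fun indices rep =>
      if PySem.Int.mod rep 2 = 0 then indices ++ forward else indices ++ backward) []

-- ===== PORT B =====
def pvElem (num_unique_blocks : Int) (p : Int) : Int :=
  let rep := PySem.Int.floordiv p num_unique_blocks
  let off := PySem.Int.mod p num_unique_blocks
  if PySem.Int.mod rep 2 = 0 then off else num_unique_blocks - 1 - off

def get_palindromic_bank_indices_alt (num_unique_blocks : Int) (recurrence_factor : Int) : List Int :=
  let total := max num_unique_blocks 0 * max recurrence_factor 0
  (PySem.List.pyRange 0 total 1).map (pvElem num_unique_blocks)

-- ===== PRECONDITION & SPEC =====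
def Spec_get_palindromic_bank_indices (num_unique_blocks : Int) (recurrence_factor : Int) (out : List Int) : Prop := out = get_palindromic_bank_indices_alt num_unique_blocks recurrence_factor
instance (num_unique_blocks : Int) (recurrence_factor : Int) (out : List Int) : Decidable (Spec_get_palindromic_bank_indices num_unique_blocks recurrence_factor out) := by unfold Spec_get_palindromic_bank_indices; infer_instance

-- ===== CLAIM (what is proved, stated in full; the proofs are below) =====
def Claim_equal_get_palindromic_bank_indices : Prop := ∀ (num_unique_blocks : Int) (recurrence_factor : Int), Dom_get_palindromic_bank_indices num_unique_blocks recurrence_factor → Spec_get_palindromic_bank_indices num_unique_blocks recurrence_factor (get_palindromic_bank_indices num_unique_blocks recurrence_factor)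

-- ===== LEMMAS AND PROOFS =====

-- A's rep-loop (extend on a growing accumulator) is a flatMap of the chosen block
lemma foldl_blocks (F B : List Int) (l : List Int) :
    l.foldl (fun indices rep =>
        if PySem.Int.mod rep 2 = 0 then indices ++ F else indices ++ B) []
      = l.flatMap (fun rep => if PySem.Int.mod rep 2 = 0 then F else B) := by
  have hfn : (fun (indices : List Int) (rep : Int) =>
        if PySem.Int.mod rep 2 = 0 then indices ++ F else indices ++ B)
      = (fun indices rep => indices ++ (if PySem.Int.mod rep 2 = 0 then F else B)) := by
    funext indices rep
    split <;> rfl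
  rw [hfn, PySem.List.foldl_append_eq_flatMap]
  simp

-- one block of B's flat pass: positions K*r .. K*r+K-1 give forward (r even) or backward (r odd)
lemma block_eq (K : Int) (hK : 0 < K) (r : Nat) :
    (PySem.List.pyRange (K * r) (K * r + K) 1).map (pvElem K)
      = (if PySem.Int.mod (r : Int) 2 = 0 then PySem.List.pyRange 0 K 1
         else (PySem.List.pyRange 0 K 1).reverse) := by
  have hmod : ∀ k : Nat, (k : Int) < K →
      pvElem K (K * r + k) = (if PySem.Int.mod (r : Int) 2 = 0 then (k : Int) else K - 1 - k) := by
    intro k hk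
    have hfd : PySem.Int.floordiv (K * r + k) K = r := by
      rw [PySem.Int.floordiv_eq_iff_of_pos hK]
      constructor
      · nlinarith [Int.natCast_nonneg k]
      · nlinarith [Int.natCast_nonneg k]
    have hmd : PySem.Int.mod (K * r + k) K = k := by
      have := PySem.Int.floordiv_mul_add_mod (K * r + k) K
      rw [hfd] at this
      linarith
    simp [pvElem, hfd, hmd]
  have e1 : K * r + K - K * r = K := by ring
  rw [PySem.List.pyRange_one (K * r), e1, List.map_map]
  by_cases hpar : PySem.Int.mod (r : Int) 2 = 0
  · rw [if_pos hpar, PySem.List.pyRange_one 0]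
    simp only [sub_zero]
    apply List.map_congr_left
    intro k hk
    rw [List.mem_range] at hk
    have hkK : (k : Int) < K := by omega
    simp only [Function.comp_apply]
    rw [hmod k hkK, if_pos hpar]
    omega
  · rw [if_neg hpar, PySem.List.pyRange_one 0, ← List.map_reverse]
    simp only [sub_zero]
    rw [List.range_eq_range', List.reverse_range', List.map_map, ← List.range_eq_range']
    apply List.map_congr_left
    intro k hk
    rw [List.mem_range] at hk
    have hkK : (k : Int) < K := by omega
    simp only [Function.comp_apply]
    rw [hmod k hkK, if_neg hpar]
    omega

-- main induction: A's rep-loop as flatMap equals B's flat pass, for K > 0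
lemma main_eq (K : Int) (hK : 0 < K) (r : Nat) :
    (PySem.List.pyRange 0 (r : Int) 1).flatMap
      (fun rep => if PySem.Int.mod rep 2 = 0 then PySem.List.pyRange 0 K 1
                  else (PySem.List.pyRange 0 K 1).reverse)
      = (PySem.List.pyRange 0 (K * r) 1).map (pvElem K) := by
  induction r with
  | zero => simp [PySem.List.pyRange_one_eq_nil]
  | succ n ih =>
    have h1 : PySem.List.pyRange 0 ((n : Int) + 1) 1
        = PySem.List.pyRange 0 (n : Int) 1 ++ [(n : Int)] :=
      PySem.List.pyRange_one_succ_right (by omega)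
    have h2 : PySem.List.pyRange 0 (K * ((n : Int) + 1)) 1
        = PySem.List.pyRange 0 (K * n) 1 ++ PySem.List.pyRange (K * n) (K * ((n : Int) + 1)) 1 :=
      PySem.List.pyRange_one_append _ _ _ (by positivity) (by nlinarith)
    push_cast
    rw [h1, h2, List.flatMap_append, List.map_append, ih]
    congr 1
    simp only [List.flatMap_cons, List.flatMap_nil, List.append_nil]
    have h3 : K * ((n : Int) + 1) = K * n + K := by ring
    rw [h3, block_eq K hK n]

-- ===== VERDICT (by name: the statement is the Claim_ definition above) =====
theorem get_palindromic_bank_indices_spec : Claim_equal_get_palindromic_bank_indices := by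
  intro K R _
  unfold Spec_get_palindromic_bank_indices get_palindromic_bank_indices get_palindromic_bank_indices_alt
  simp only []
  rw [foldl_blocks]
  by_cases hR : R ≤ 0
  · rw [PySem.List.pyRange_one_eq_nil hR]
    have hm : max R 0 = 0 := by omega
    rw [hm, mul_zero, PySem.List.pyRange_one_eq_nil (le_refl 0)]
    simp
  · by_cases hK : K ≤ 0
    · have hm : max K 0 = 0 := by omega
      rw [hm, zero_mul, PySem.List.pyRange_one_eq_nil (le_refl 0)]
      simp [PySem.List.pyRange_one_eq_nil hK]
    · have hK' : 0 < K := by omega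
      have hmK : max K 0 = K := by omega
      have hmR : max R 0 = R := by omega
      rw [hmK, hmR]
      have hRnat : R = ((R.toNat : Nat) : Int) := by omega
      rw [hRnat]
      exact main_eq K hK' R.toNat
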